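-- pv_equiv track=rewrite | github.com/ktheis/pqtutor | comments.py | format_natural_language
-- ===== SOURCE A (Python) =====
-- def format_natural_language(word):
--     charlist = list(word)
--     cl2 = []
--     while charlist:
--         c = charlist.pop(0)
--         if c == " " and cl2 and cl2[-1] == ' ':
--             cl2.append("&nbsp;")
--         else:
--             cl2.append(c)
--     return "".join(cl2)
-- ===== SOURCE B (Python) =====
-- def format_natural_language(word):
--     out = []
--     i = 0
--     n = len(word)
--     while i < n:
--         if word[i] == ' ':
--             j = i
--             while j < n and word[j] == ' ':
--                 j += 1
--             run = j - i
--             out.append(' &nbsp;' * (run // 2) + ' ' * (run % 2))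
--             i = j
--         else:
--             out.append(word[i])
--             i += 1
--     return ''.join(out)
-- ===== Notes on version B (the rewrite author's own statement) =====
-- stated objective: faster
-- what changed: B scans the string once for maximal runs of spaces and emits each run by a closed form on its length (alternating space and nbsp entity), instead of A's stateful character-by-character pass that pops from the front of a list and inspects the last emitted token.
import Mathlib
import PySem

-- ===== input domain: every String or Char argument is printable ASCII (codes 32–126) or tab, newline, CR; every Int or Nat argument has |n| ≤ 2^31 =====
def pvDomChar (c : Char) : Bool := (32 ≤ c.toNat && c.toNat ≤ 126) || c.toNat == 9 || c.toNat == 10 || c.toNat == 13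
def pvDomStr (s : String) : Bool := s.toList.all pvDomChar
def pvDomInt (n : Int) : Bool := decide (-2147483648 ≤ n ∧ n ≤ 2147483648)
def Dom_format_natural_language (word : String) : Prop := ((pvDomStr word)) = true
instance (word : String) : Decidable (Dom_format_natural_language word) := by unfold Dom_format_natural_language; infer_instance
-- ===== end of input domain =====

-- B finds maximal runs of spaces and emits each run by a closed form on its length, instead of A's
-- stateful char-by-char pass inspecting the last emitted token; same return value on all strings.


-- ===== PORT A =====
-- the while/pop(0) loop, consuming chars from the front and appending tokens to cl2
def fnlGoA : List Char → List String → List String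
  | [], cl2 => cl2
  | c :: rest, cl2 =>
    if c = ' ' ∧ cl2 ≠ [] ∧ cl2.getLast? = some " " then
      fnlGoA rest (cl2 ++ ["&nbsp;"])
    else
      fnlGoA rest (cl2 ++ [String.ofList [c]])

def format_natural_language (word : String) : String :=
  PySem.Str.join "" (fnlGoA word.toList [])

-- ===== PORT B =====
-- ' &nbsp;' * n  (string repetition)
def fnlRep (s : String) : Nat → String
  | 0 => ""
  | n + 1 => s ++ fnlRep s n

-- the outer index loop; the inner while that scans a run of spaces is the takeWhile/dropWhile pair
def fnlGoB : List Char → List String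
  | [] => []
  | c :: rest =>
    if c = ' ' then
      let sp := rest.takeWhile (fun x => x = ' ')
      let run := sp.length + 1
      (fnlRep " &nbsp;" (run / 2) ++ fnlRep " " (run % 2)) :: fnlGoB (rest.dropWhile (fun x => x = ' '))
    else
      String.ofList [c] :: fnlGoB rest
termination_by l => l.length
decreasing_by
  · exact Nat.lt_succ_of_le (List.length_dropWhile_le _ _)
  · simp

def format_natural_language_alt (word : String) : String :=
  PySem.Str.join "" (fnlGoB word.toList)

-- ===== PRECONDITION & SPEC =====
def Spec_format_natural_language (word : String) (out : String) : Prop := out = format_natural_language_alt word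
instance (word : String) (out : String) : Decidable (Spec_format_natural_language word out) := by unfold Spec_format_natural_language; infer_instance

-- ===== CLAIM (what is proved, stated in full; the proofs are below) =====
def Claim_equal_format_natural_language : Prop := ∀ (word : String), Dom_format_natural_language word → Spec_format_natural_language word (format_natural_language word)

-- ===== LEMMAS AND PROOFS =====

-- A's loop with its state abstracted: the only part of cl2 the loop reads is whether the last token is " "
def fnlFA : List Char → Bool → List String
  | [], _ => []
  | c :: rest, last =>
    if c = ' ' then
      if last then "&nbsp;" :: fnlFA rest false else " " :: fnlFA rest true
    else
      String.ofList [c] :: fnlFA rest false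

theorem fnlGoA_eq (cs : List Char) : ∀ acc : List String,
    fnlGoA cs acc = acc ++ fnlFA cs (decide (acc.getLast? = some " ")) := by
  induction cs with
  | nil => intro acc; simp [fnlGoA, fnlFA]
  | cons c rest ih =>
    intro acc
    by_cases hc : c = ' '
    · by_cases hl : acc.getLast? = some " "
      · have hne : acc ≠ [] := by intro h; simp [h] at hl
        rw [fnlGoA, if_pos ⟨hc, hne, hl⟩, ih]
        simp [hc, hl, fnlFA]
      · rw [fnlGoA, if_neg (by simp [hl])]
        rw [ih]
        simp [hc, hl, fnlFA]
    · rw [fnlGoA, if_neg (by simp [hc])]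
      rw [ih]
      have hns : String.ofList [c] ≠ " " := by
        intro h
        exact hc (by simpa using congrArg String.toList h)
      simp [hc, hns, fnlFA]

-- repetition at the List Char level
def fnlRepL (l : List Char) : Nat → List Char
  | 0 => []
  | n + 1 => l ++ fnlRepL l n

theorem toList_fnlRep (s : String) (n : Nat) : (fnlRep s n).toList = fnlRepL s.toList n := by
  induction n with
  | zero => simp [fnlRep, fnlRepL]
  | succ n ih => simp [fnlRep, fnlRepL, ih]

theorem chars_join_nil_eq_flatten (l : List (List Char)) : PySem.Chars.join [] l = l.flatten := by
  induction l with
  | nil => simp [PySem.Chars.join_nil]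
  | cons p t ih =>
    cases t with
    | nil => simp [PySem.Chars.join_singleton]
    | cons q r => rw [PySem.Chars.join_cons_cons, ih]; simp

-- flag true behaves like flag false when the next char is not a space
theorem fnlFA_true_eq (rest : List Char) (h : ∀ x, rest.head? = some x → x ≠ ' ') :
    fnlFA rest true = fnlFA rest false := by
  cases rest with
  | nil => rfl
  | cons c t =>
    have : c ≠ ' ' := h c rfl
    simp [fnlFA, this]

def fnlFlat (l : List String) : List Char := (l.map String.toList).flatten

-- the run closed form: A's alternating output on a maximal run of k spaces
theorem fnlRun (k : Nat) : ∀ rest : List Char, (∀ x, rest.head? = some x → x ≠ ' ') →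
    fnlFlat (fnlFA (List.replicate k ' ' ++ rest) false) =
      fnlRepL " &nbsp;".toList (k / 2) ++ fnlRepL [' '] (k % 2) ++ fnlFlat (fnlFA rest false) := by
  induction k using Nat.strong_induction_on with
  | _ k ih =>
    intro rest hrest
    match k with
    | 0 => simp [fnlRepL]
    | 1 =>
      rw [show List.replicate 1 ' ' ++ rest = ' ' :: rest from rfl]
      rw [show fnlFA (' ' :: rest) false = " " :: fnlFA rest true by simp [fnlFA]]
      rw [fnlFA_true_eq rest hrest]
      simp [fnlFlat, fnlRepL]
    | (m + 2) =>
      rw [show List.replicate (m + 2) ' ' ++ rest = ' ' :: ' ' :: (List.replicate m ' ' ++ rest) by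
        simp [List.replicate_succ]]
      rw [show fnlFA (' ' :: ' ' :: (List.replicate m ' ' ++ rest)) false
            = " " :: "&nbsp;" :: fnlFA (List.replicate m ' ' ++ rest) false by simp [fnlFA]]
      have h2 : fnlFlat (" " :: "&nbsp;" :: fnlFA (List.replicate m ' ' ++ rest) false)
          = " &nbsp;".toList ++ fnlFlat (fnlFA (List.replicate m ' ' ++ rest) false) := by
        simp only [fnlFlat, List.map_cons, List.flatten_cons, ← List.append_assoc]
        rw [show " ".toList ++ "&nbsp;".toList = " &nbsp;".toList by decide]
      rw [h2, ih m (by omega) rest hrest]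
      have hd : (m + 2) / 2 = m / 2 + 1 := by omega
      have hm : (m + 2) % 2 = m % 2 := by omega
      rw [hd, hm, show fnlRepL " &nbsp;".toList (m / 2 + 1)
            = " &nbsp;".toList ++ fnlRepL " &nbsp;".toList (m / 2) from rfl]
      simp

theorem fnlMain (cs : List Char) : fnlFlat (fnlFA cs false) = fnlFlat (fnlGoB cs) := by
  induction hn : cs.length using Nat.strong_induction_on generalizing cs with
  | _ n ih =>
    cases cs with
    | nil => simp [fnlFA, fnlGoB]
    | cons c rest =>
      have hn' : rest.length + 1 = n := by simpa using hn
      by_cases hc : c = ' '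
      · subst hc
        set sp := rest.takeWhile (fun x => x = ' ') with hsp
        set dr := rest.dropWhile (fun x => x = ' ') with hdr
        have hsplit : sp ++ dr = rest := List.takeWhile_append_dropWhile
        have hrep : sp = List.replicate sp.length ' ' := by
          apply List.eq_replicate_of_mem
          intro x hx
          have := List.mem_takeWhile_imp (hsp ▸ hx)
          simpa using this
        have hhead : ∀ x, dr.head? = some x → x ≠ ' ' := by
          intro x hx
          have h := List.head?_dropWhile_not (fun x => decide (x = ' ')) rest
          rw [← hdr] at h
          rw [hx] at h
          simpa using h
        have hcons : ' ' :: rest = List.replicate (sp.length + 1) ' ' ++ dr := by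
          rw [List.replicate_succ, List.cons_append]
          exact congrArg (' ' :: ·) (hsplit.symm.trans (congrArg (· ++ dr) hrep))
        have hA : fnlFlat (fnlFA (' ' :: rest) false)
            = fnlRepL " &nbsp;".toList ((sp.length + 1) / 2) ++ fnlRepL [' '] ((sp.length + 1) % 2)
                ++ fnlFlat (fnlFA dr false) := by
          rw [hcons]; exact fnlRun _ dr hhead
        have hdrlen : dr.length < n :=
          Nat.lt_of_le_of_lt (List.length_dropWhile_le _ _) (by omega)
        have hB : fnlGoB (' ' :: rest)
            = (fnlRep " &nbsp;" ((sp.length + 1) / 2) ++ fnlRep " " ((sp.length + 1) % 2))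
                :: fnlGoB dr := by
          simp only [fnlGoB]
          simp
          exact ⟨by rw [← hsp], by rw [← hdr]⟩
        rw [hA, hB]
        simp only [fnlFlat, List.map_cons, List.flatten_cons]
        rw [show (List.map String.toList (fnlFA dr false)).flatten = fnlFlat (fnlFA dr false) from rfl,
            ih dr.length (by omega) dr rfl]
        simp only [String.toList_append, toList_fnlRep]
        rw [show " ".toList = [' '] by decide]
        simp [fnlFlat, List.append_assoc]
      · rw [show fnlFA (c :: rest) false = String.ofList [c] :: fnlFA rest false by simp [fnlFA, hc]]
        have hB : fnlGoB (c :: rest) = String.ofList [c] :: fnlGoB rest := by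
          simp only [fnlGoB]
          simp [hc]
        rw [hB]
        simp only [fnlFlat, List.map_cons, List.flatten_cons]
        rw [show (List.map String.toList (fnlFA rest false)).flatten = fnlFlat (fnlFA rest false) from rfl,
            ih rest.length (by omega) rest rfl]
        rfl

theorem fnlJoin_eq (l₁ l₂ : List String) (h : fnlFlat l₁ = fnlFlat l₂) :
    PySem.Str.join "" l₁ = PySem.Str.join "" l₂ := by
  apply String.toList_inj.mp
  have b1 : (PySem.Str.join "" l₁).toList = PySem.Chars.join [] (l₁.map String.toList) := by
    simp [PySem.Str.join]
  have b2 : (PySem.Str.join "" l₂).toList = PySem.Chars.join [] (l₂.map String.toList) := by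
    simp [PySem.Str.join]
  rw [b1, b2, chars_join_nil_eq_flatten, chars_join_nil_eq_flatten]
  exact h

-- ===== VERDICT (by name: the statement is the Claim_ definition above) =====
theorem format_natural_language_spec : Claim_equal_format_natural_language := by
  intro word _
  unfold Spec_format_natural_language format_natural_language format_natural_language_alt
  rw [fnlGoA_eq]
  simp only [List.nil_append, List.getLast?_nil]
  exact fnlJoin_eq _ _ (by simpa using fnlMain word.toList)
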